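-- pv_equiv track=rewrite | github.com/hdeep03/advent-of-code | day-10/b.py | xray
-- ===== SOURCE A (Python) =====
-- def has_open_north(symbol):
--     return symbol in ['|', 'L', 'J']
--
-- def xray(matrix, path_nodes):
--     mask = [[False] * len(matrix[0]) for _ in matrix]
--     for nx in range(0, len(matrix)):
--         count = 0
--         for ny in range(0, len(matrix[0])):
--             on_path = (nx, ny) in path_nodes
--             if on_path and has_open_north(matrix[nx][ny]):
--                 count += 1
--             mask[nx][ny] = count % 2 != 0
--     return mask
-- ===== SOURCE B (Python) =====
-- def xray(matrix, path_nodes):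
--     width = len(matrix[0]) if matrix else 0
--     out = []
--     for nx in range(len(matrix)):
--         crossings = [ny for ny in range(width)
--                      if (nx, ny) in path_nodes and matrix[nx][ny] in ('|', 'L', 'J')]
--         row = [False] * width
--         i = 0
--         while i + 1 < len(crossings):
--             for ny in range(crossings[i], crossings[i + 1]):
--                 row[ny] = True
--             i += 2
--         if len(crossings) % 2 == 1:
--             for ny in range(crossings[-1], width):
--                 row[ny] = True
--         out.append(row)
--     return out
-- ===== Notes on version B (the rewrite author's own statement) =====
-- stated objective: alternative
-- what changed: Instead of maintaining a running parity count per cell while writing the mask, B first collects each row's crossing columns into a list and then fills True spans between consecutive crossing pairs (with an odd last crossing filling to the row end).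
import Mathlib
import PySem

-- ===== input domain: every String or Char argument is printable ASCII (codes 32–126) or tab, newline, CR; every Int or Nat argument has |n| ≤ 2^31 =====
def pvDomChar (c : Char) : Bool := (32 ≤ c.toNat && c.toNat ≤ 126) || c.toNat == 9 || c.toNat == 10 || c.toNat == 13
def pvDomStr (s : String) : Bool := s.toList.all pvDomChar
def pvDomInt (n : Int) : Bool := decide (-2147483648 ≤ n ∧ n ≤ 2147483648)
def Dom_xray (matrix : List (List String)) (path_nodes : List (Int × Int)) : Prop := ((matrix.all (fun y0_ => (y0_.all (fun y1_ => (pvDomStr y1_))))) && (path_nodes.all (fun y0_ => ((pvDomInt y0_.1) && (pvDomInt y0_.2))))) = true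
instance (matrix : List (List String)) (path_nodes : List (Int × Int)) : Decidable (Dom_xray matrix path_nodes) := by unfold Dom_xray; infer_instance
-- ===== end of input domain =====

-- B separates crossing-detection from filling: per row it first collects the crossing columns,
-- then fills True spans between consecutive crossing pairs (alternative decomposition, not faster).


-- ===== PORT A =====
def hasOpenNorth (symbol : String) : Bool := symbol ∈ ["|", "L", "J"]

def xray (matrix : List (List String)) (path_nodes : List (Int × Int)) : List (List Bool) :=
  let w : Int := ((PySem.List.pyGet? matrix 0).getD []).length
  let mask : List (List Bool) := matrix.map (fun _ => List.replicate w.toNat false)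
  (PySem.List.pyRange 0 matrix.length 1).foldl (fun mask nx =>
    ((PySem.List.pyRange 0 w 1).foldl (fun (st : List (List Bool) × Int) ny =>
        let on_path : Bool := decide ((nx, ny) ∈ path_nodes)
        let count : Int :=
          if on_path && hasOpenNorth (PySem.List.pyGetD (PySem.List.pyGetD matrix nx []) ny "") then
            st.2 + 1
          else st.2
        (PySem.List.pySetD st.1 nx
           (PySem.List.pySetD (PySem.List.pyGetD st.1 nx []) ny (decide (PySem.Int.mod count 2 ≠ 0))),
         count))
      (mask, 0)).1) mask

-- ===== PORT B =====
def isNorthOpen (s : String) : Bool := s == "|" || s == "L" || s == "J"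

def crossingCols (matrix : List (List String)) (path_nodes : List (Int × Int)) (nx width : Int) : List Int :=
  (PySem.List.pyRange 0 width 1).filter (fun ny =>
    decide ((nx, ny) ∈ path_nodes) && isNorthOpen (PySem.List.pyGetD (PySem.List.pyGetD matrix nx []) ny ""))

def fillTrue (row : List Bool) (a b : Int) : List Bool :=
  (PySem.List.pyRange a b 1).foldl (fun r ny => PySem.List.pySetD r ny true) row

def fillSpans (width : Int) : List Int → List Bool → List Bool
  | a :: b :: rest, row => fillSpans width rest (fillTrue row a b)
  | [a], row => fillTrue row a width
  | [], row => row

def xray_alt (matrix : List (List String)) (path_nodes : List (Int × Int)) : List (List Bool) :=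
  let width : Int := if matrix.isEmpty then 0 else ((PySem.List.pyGet? matrix 0).getD []).length
  (PySem.List.pyRange 0 matrix.length 1).map (fun nx =>
    fillSpans width (crossingCols matrix path_nodes nx width) (List.replicate width.toNat false))

-- ===== PRECONDITION & SPEC =====
-- Pre_ excludes exactly the inputs where Python A raises IndexError: ragged matrices where some
-- on-path cell (nx, ny) with ny < len(matrix[0]) lies beyond the end of its own (shorter) row nx.
def Pre_xray (matrix : List (List String)) (path_nodes : List (Int × Int)) : Prop :=
  ∀ i < matrix.length, ∀ j < (matrix.headD []).length,
    ((i : Int), (j : Int)) ∈ path_nodes → j < (matrix.getD i []).length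
instance (matrix : List (List String)) (path_nodes : List (Int × Int)) : Decidable (Pre_xray matrix path_nodes) := by unfold Pre_xray; infer_instance

def pvWitness_xray : List (List String) × (List (Int × Int)) :=
  ([["|", "."], [".", "L"]], [(0, 0), (1, 1)])

def Spec_xray (matrix : List (List String)) (path_nodes : List (Int × Int)) (out : List (List Bool)) : Prop := out = xray_alt matrix path_nodes
instance (matrix : List (List String)) (path_nodes : List (Int × Int)) (out : List (List Bool)) : Decidable (Spec_xray matrix path_nodes out) := by unfold Spec_xray; infer_instance

-- ===== CLAIM (what is proved, stated in full; the proofs are below) =====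
def Claim_equal_xray : Prop := ∀ (matrix : List (List String)) (path_nodes : List (Int × Int)), Dom_xray matrix path_nodes → Pre_xray matrix path_nodes → Spec_xray matrix path_nodes (xray matrix path_nodes)

-- ===== LEMMAS AND PROOFS =====

-- shared crossing predicate (the condition both programs test at a cell)
def crossP (matrix : List (List String)) (path_nodes : List (Int × Int)) (nx ny : Int) : Bool :=
  decide ((nx, ny) ∈ path_nodes) && hasOpenNorth (PySem.List.pyGetD (PySem.List.pyGetD matrix nx []) ny "")

-- A's inner-loop step on the full mask, and the same step restricted to the touched row
def maskStep (matrix : List (List String)) (path_nodes : List (Int × Int)) (nx : Int)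
    (st : List (List Bool) × Int) (ny : Int) : List (List Bool) × Int :=
  let count := if crossP matrix path_nodes nx ny then st.2 + 1 else st.2
  (PySem.List.pySetD st.1 nx
     (PySem.List.pySetD (PySem.List.pyGetD st.1 nx []) ny (decide (PySem.Int.mod count 2 ≠ 0))),
   count)

def rowStep (matrix : List (List String)) (path_nodes : List (Int × Int)) (nx : Int)
    (st : List Bool × Int) (ny : Int) : List Bool × Int :=
  let count := if crossP matrix path_nodes nx ny then st.2 + 1 else st.2
  (PySem.List.pySetD st.1 ny (decide (PySem.Int.mod count 2 ≠ 0)), count)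

-- number of crossings of row i among columns < n
def cnt (matrix : List (List String)) (path_nodes : List (Int × Int)) (i n : Nat) : Nat :=
  (List.range n).countP (fun (j : Nat) => crossP matrix path_nodes (i : Int) ((j : Nat) : Int))

lemma north_eq (s : String) : isNorthOpen s = hasOpenNorth s := by
  have h : ∀ t : String, (s == t) = decide (s = t) := by
    intro t; by_cases h : s = t <;> simp [h]
  simp [isNorthOpen, hasOpenNorth, List.mem_cons, h, Bool.or_assoc]

lemma xray_eq_foldl (matrix : List (List String)) (path_nodes : List (Int × Int)) :
    xray matrix path_nodes =
      (PySem.List.pyRange 0 (matrix.length : Int) 1).foldl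
        (fun mask nx =>
          ((PySem.List.pyRange 0 (((PySem.List.pyGet? matrix 0).getD []).length : Int) 1).foldl
            (maskStep matrix path_nodes nx) (mask, 0)).1)
        (matrix.map (fun _ => List.replicate (((PySem.List.pyGet? matrix 0).getD []).length : Int).toNat false)) := by
  rfl

-- A's inner loop only rewrites row i of the mask
lemma foldl_maskStep (matrix : List (List String)) (path_nodes : List (Int × Int)) (i : Nat) :
    ∀ (l : List Int) (mask : List (List Bool)) (c : Int) (h : i < mask.length),
      l.foldl (maskStep matrix path_nodes (i : Int)) (mask, c)
        = (mask.set i (l.foldl (rowStep matrix path_nodes (i : Int)) (mask[i], c)).1,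
           (l.foldl (rowStep matrix path_nodes (i : Int)) (mask[i], c)).2) := by
  intro l
  induction l with
  | nil => intro mask c h; simp [List.set_getElem_self]
  | cons ny l ih =>
    intro mask c h
    have hstep : maskStep matrix path_nodes (i : Int) (mask, c) ny
        = (mask.set i (rowStep matrix path_nodes (i : Int) (mask[i], c) ny).1,
           (rowStep matrix path_nodes (i : Int) (mask[i], c) ny).2) := by
      simp [maskStep, rowStep, List.getElem?_eq_getElem h]
    simp only [List.foldl_cons]
    rw [hstep, ih _ _ (by simpa using h)]
    simp [List.set_set, List.getElem_set_self]

-- characterisation of A's inner loop: running parity per cell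
lemma rowA_eq (matrix : List (List String)) (path_nodes : List (Int × Int)) (i W : Nat) :
    ∀ n, n ≤ W →
      (PySem.List.pyRange 0 (n : Int) 1).foldl (rowStep matrix path_nodes (i : Int))
          (List.replicate W false, 0)
        = ((List.range W).map
             (fun j => if j < n then decide (cnt matrix path_nodes i (j+1) % 2 = 1) else false),
           (cnt matrix path_nodes i n : Int)) := by
  intro n
  induction n with
  | zero =>
    intro _
    rw [PySem.List.pyRange_one_eq_nil (by omega)]
    simp [cnt]
  | succ n ih =>
    intro hn
    have hcast : ((n+1 : Nat) : Int) = (n : Int) + 1 := by push_cast; ring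
    rw [hcast, PySem.List.pyRange_one_succ_right (by omega), List.foldl_append,
        ih (by omega)]
    have hcnt : cnt matrix path_nodes i (n+1)
        = cnt matrix path_nodes i n + (if crossP matrix path_nodes (i:Int) (n:Int) then 1 else 0) := by
      simp [cnt, List.range_succ, List.countP_append, List.countP_cons]
    have hc' : (if crossP matrix path_nodes (i:Int) (n:Int) then ((cnt matrix path_nodes i n : Int)) + 1
                  else (cnt matrix path_nodes i n : Int))
        = (cnt matrix path_nodes i (n+1) : Int) := by
      by_cases hx : crossP matrix path_nodes (i:Int) (n:Int) <;> simp [hx, hcnt]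
    have hval : decide (PySem.Int.mod (cnt matrix path_nodes i (n+1) : Int) 2 ≠ 0)
        = decide (cnt matrix path_nodes i (n+1) % 2 = 1) := by
      rw [PySem.Int.mod_eq_emod_of_pos (by norm_num)]
      rw [decide_eq_decide]
      omega
    simp only [List.foldl_cons, List.foldl_nil, rowStep, hc', hval,
      PySem.List.pySetD_natCast]
    simp only [Prod.mk.injEq]
    refine ⟨?_, trivial⟩
    · apply List.ext_getElem
      · simp
      · intro j h1 h2
        simp only [List.getElem_set, List.getElem_map, List.getElem_range]
        simp only [List.length_set, List.length_map, List.length_range] at h1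
        by_cases hj : n = j
        · subst hj; simp
        · simp only [if_neg hj]
          by_cases hjn : j < n
          · rw [if_pos hjn, if_pos (by omega : j < n + 1)]
          · rw [if_neg hjn, if_neg (by omega : ¬ j < n + 1)]

-- fillTrue: length and pointwise value
lemma length_setFold : ∀ (l : List Int) (row : List Bool),
    (l.foldl (fun r ny => PySem.List.pySetD r ny true) row).length = row.length := by
  intro l
  induction l with
  | nil => intro row; rfl
  | cons x l ih => intro row; rw [List.foldl_cons, ih]; simp [PySem.List.length_pySetD]

lemma length_fillTrue (row : List Bool) (a b : Int) :
    (fillTrue row a b).length = row.length := length_setFold _ _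

lemma fillTrue_getD (n : Nat) : ∀ (a b : Int) (row : List Bool) (j : Nat),
    (b - a).toNat = n → 0 ≤ a → j < row.length →
    (fillTrue row a b).getD j false
      = (row.getD j false || decide (a ≤ (j:Int) ∧ (j:Int) < b)) := by
  induction n with
  | zero =>
    intro a b row j hn ha hj
    have hd : decide (a ≤ (j:Int) ∧ (j:Int) < b) = false := by
      simp only [decide_eq_false_iff_not]
      omega
    rw [fillTrue, PySem.List.pyRange_one_eq_nil (by omega), List.foldl_nil, hd]
    simp
  | succ n ih =>
    intro a b row j hn ha hj
    have hab : a < b := by omega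
    rw [fillTrue, PySem.List.pyRange_one_cons hab, List.foldl_cons]
    have hstep : PySem.List.pySetD row a true = row.set a.toNat true :=
      PySem.List.pySetD_of_nonneg row true ha
    rw [hstep]
    have hlen : j < (row.set a.toNat true).length := by simpa using hj
    have := ih (a+1) b (row.set a.toNat true) j (by omega) (by omega) hlen
    rw [show (PySem.List.pyRange (a+1) b 1).foldl (fun r ny => PySem.List.pySetD r ny true)
          (row.set a.toNat true) = fillTrue (row.set a.toNat true) (a+1) b from rfl, this]
    rw [List.getD_eq_getElem _ _ hlen, List.getD_eq_getElem _ _ hj, List.getElem_set]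
    by_cases hja : a.toNat = j
    · have hje : (j : Int) = a := by omega
      simp [hja, hje, hab]
    · have hne : (j : Int) ≠ a := by omega
      rw [if_neg hja]
      have : decide (a + 1 ≤ (j:Int) ∧ (j:Int) < b) = decide (a ≤ (j:Int) ∧ (j:Int) < b) := by
        rw [decide_eq_decide]; omega
      rw [this]

-- fillSpans: length and pointwise parity value
lemma length_fillSpans (w : Int) : ∀ (n : Nat) (cs : List Int) (row : List Bool),
    cs.length ≤ n → (fillSpans w cs row).length = row.length := by
  intro n
  induction n with
  | zero =>
    intro cs row h
    have : cs = [] := by cases cs <;> simp_all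
    subst this; rfl
  | succ n ih =>
    intro cs row h
    match cs with
    | [] => rfl
    | [a] => simpa [fillSpans] using length_fillTrue row a w
    | a :: b :: rest =>
      show (fillSpans w rest (fillTrue row a b)).length = row.length
      rw [ih rest _ (by simp at h; omega), length_fillTrue]

lemma fillSpans_getD (W : Nat) : ∀ (n : Nat) (cs : List Int) (row : List Bool),
    cs.length ≤ n → cs.Pairwise (· < ·) → (∀ x ∈ cs, 0 ≤ x) → row.length = W →
    ∀ j, j < W →
    (fillSpans (W : Int) cs row).getD j false
      = (row.getD j false || decide ((cs.countP (fun c => decide (c ≤ (j:Int)))) % 2 = 1)) := by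
  intro n
  induction n with
  | zero =>
    intro cs row h _ _ _ j _
    have : cs = [] := by cases cs <;> simp_all
    subst this; simp [fillSpans]
  | succ n ih =>
    intro cs row h hp hnn hrow j hj
    match cs with
    | [] => simp [fillSpans]
    | [a] =>
      have ha : 0 ≤ a := hnn a (by simp)
      show (fillTrue row a (W : Int)).getD j false = _
      rw [fillTrue_getD _ a (W:Int) row j rfl ha (by omega)]
      have hjW : ((j:Int) < (W:Int)) := by exact_mod_cast hj
      by_cases haj : a ≤ (j:Int)
      · simp [haj, hjW]
      · simp [haj]
    | a :: b :: rest =>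
      have ha : 0 ≤ a := hnn a (by simp)
      have hb : 0 ≤ b := hnn b (by simp)
      have hab : a < b := by
        have := List.pairwise_cons.mp hp
        exact this.1 b (by simp)
      have hrest_gt : ∀ x ∈ rest, b < x := by
        have := List.pairwise_cons.mp (List.pairwise_cons.mp hp).2
        exact this.1
      have hptail : rest.Pairwise (· < ·) :=
        (List.pairwise_cons.mp (List.pairwise_cons.mp hp).2).2
      show (fillSpans (W:Int) rest (fillTrue row a b)).getD j false = _
      rw [ih rest (fillTrue row a b) (by simp at h ⊢; omega) hptail
          (fun x hx => by have := hrest_gt x hx; omega)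
          (by rw [length_fillTrue]; exact hrow) j hj]
      rw [fillTrue_getD _ a b row j rfl ha (by omega)]
      simp only [List.countP_cons]
      by_cases hbj : b ≤ (j:Int)
      · have haj : a ≤ (j:Int) := by omega
        have hnotspan : decide (a ≤ (j:Int) ∧ (j:Int) < b) = false := by
          simp only [decide_eq_false_iff_not]; omega
        have hpar : ((rest.countP (fun c => decide (c ≤ (j:Int))) + (if (b ≤ (j:Int)) then 1 else 0))
              + (if (a ≤ (j:Int)) then 1 else 0)) % 2
            = rest.countP (fun c => decide (c ≤ (j:Int))) % 2 := by
          simp [haj, hbj]; omega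
        simp only [decide_eq_true_eq] at hpar ⊢
        rw [hnotspan]
        simp only [haj, hbj, if_true, Bool.or_false]
        rw [show (rest.countP (fun c => decide (c ≤ (j:Int))) + 1 + 1) % 2
              = rest.countP (fun c => decide (c ≤ (j:Int))) % 2 by omega]
      · by_cases haj : a ≤ (j:Int)
        · have hspan : decide (a ≤ (j:Int) ∧ (j:Int) < b) = true := by
            simp only [decide_eq_true_eq]; constructor <;> omega
          have hr0 : rest.countP (fun c => decide (c ≤ (j:Int))) = 0 := by
            apply List.countP_eq_zero.mpr
            intro x hx
            have := hrest_gt x hx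
            simp only [decide_eq_true_eq]
            omega
          rw [hspan, hr0]
          simp [haj, hbj]
        · have hnotspan : decide (a ≤ (j:Int) ∧ (j:Int) < b) = false := by
            simp only [decide_eq_false_iff_not]; omega
          rw [hnotspan]
          simp [haj, hbj]

-- B's crossing list is A's crossing predicate filtered over the columns
lemma crossingCols_eq (matrix : List (List String)) (path_nodes : List (Int × Int)) (nx w : Int) :
    crossingCols matrix path_nodes nx w
      = (PySem.List.pyRange 0 w 1).filter (crossP matrix path_nodes nx) := by
  unfold crossingCols crossP
  congr 1
  funext ny
  rw [north_eq]

-- counting B's crossings up to column j equals A's running count after column j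
lemma countCross (matrix : List (List String)) (path_nodes : List (Int × Int)) (i W j : Nat)
    (hj : j < W) :
    ((PySem.List.pyRange 0 (W : Int) 1).filter (crossP matrix path_nodes (i:Int))).countP
        (fun c => decide (c ≤ (j:Int)))
      = cnt matrix path_nodes i (j+1) := by
  rw [List.countP_filter, PySem.List.pyRange_one]
  simp only [sub_zero, Int.toNat_natCast, zero_add, List.countP_map]
  have hW : W = (j+1) + (W - (j+1)) := by omega
  rw [hW, List.range_add, List.countP_append, List.countP_map]
  have h1 : (List.range (j+1)).countP
        ((fun c => decide (c ≤ (j:Int)) && crossP matrix path_nodes (i:Int) c) ∘ (fun k : Nat => (k:Int)))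
      = cnt matrix path_nodes i (j+1) := by
    unfold cnt
    apply List.countP_congr
    intro k hk
    have : k < j + 1 := List.mem_range.mp hk
    simp only [Function.comp]
    constructor
    · intro hx; simp at hx ⊢; exact hx.2
    · intro hx
      simp only [Bool.and_eq_true, decide_eq_true_eq]
      exact ⟨by omega, hx⟩
  have h2 : (List.range (W - (j+1))).countP
        (((fun c => decide (c ≤ (j:Int)) && crossP matrix path_nodes (i:Int) c) ∘ (fun k : Nat => (k:Int))) ∘
          (fun x => (j+1) + x)) = 0 := by
    apply List.countP_eq_zero.mpr
    intro x _
    simp only [Function.comp, Bool.and_eq_true, decide_eq_true_eq]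
    rintro ⟨hle, -⟩
    omega
  rw [h1, h2]
  omega

-- A's whole computation as a per-row map
lemma outer_fold (matrix : List (List String)) (path_nodes : List (Int × Int)) (W : Nat) :
    ∀ (k : Nat), k ≤ matrix.length →
      (PySem.List.pyRange 0 (k : Int) 1).foldl
          (fun mask nx =>
            ((PySem.List.pyRange 0 (W : Int) 1).foldl (maskStep matrix path_nodes nx) (mask, 0)).1)
          (matrix.map (fun _ => List.replicate W false))
        = (List.range k).map
            (fun (i : Nat) => ((PySem.List.pyRange 0 (W : Int) 1).foldl (rowStep matrix path_nodes ((i:Nat):Int))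
                (List.replicate W false, 0)).1)
          ++ (matrix.map (fun _ => List.replicate W false)).drop k := by
  intro k
  induction k with
  | zero =>
    intro _
    rw [show PySem.List.pyRange 0 ((0:Nat):Int) 1 = [] from
      PySem.List.pyRange_one_eq_nil (by simp)]
    simp
  | succ k ih =>
    intro hk
    have hcast : ((k+1 : Nat) : Int) = (k : Int) + 1 := by push_cast; ring
    rw [hcast, PySem.List.pyRange_one_succ_right (by omega), List.foldl_append, ih (by omega)]
    simp only [List.foldl_cons, List.foldl_nil]
    set mask0 := matrix.map (fun _ => List.replicate W false) with hmask0
    have hlen0 : mask0.length = matrix.length := by simp [hmask0]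
    set pre := (List.range k).map
        (fun (i : Nat) => ((PySem.List.pyRange 0 (W : Int) 1).foldl (rowStep matrix path_nodes ((i:Nat):Int))
            (List.replicate W false, 0)).1) with hpre
    have hprelen : pre.length = k := by simp [hpre]
    have hklt : k < mask0.length := by omega
    have hmlen : k < (pre ++ mask0.drop k).length := by
      simp [hprelen, List.length_drop]; omega
    rw [foldl_maskStep matrix path_nodes k _ _ _ hmlen]
    have hget : (pre ++ mask0.drop k)[k]'hmlen = List.replicate W false := by
      rw [List.getElem_append_right (by omega)]
      simp [hprelen, hmask0]
    rw [hget]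
    rw [List.set_append]
    rw [if_neg (by omega)]
    rw [List.drop_eq_getElem_cons hklt]
    simp only [hprelen, Nat.sub_self]
    rw [show ∀ (x r : List Bool) (t : List (List Bool)), (x :: t).set 0 r = r :: t from
      fun _ _ _ => rfl]
    rw [List.range_succ, List.map_append]
    simp [hpre]

-- B's whole computation as a per-row map over Nat row indices
lemma xray_alt_eq (matrix : List (List String)) (path_nodes : List (Int × Int)) :
    xray_alt matrix path_nodes
      = (List.range matrix.length).map
          (fun (i : Nat) =>
            fillSpans (((PySem.List.pyGet? matrix 0).getD []).length : Int)
              (crossingCols matrix path_nodes ((i:Nat):Int)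
                (((PySem.List.pyGet? matrix 0).getD []).length : Int))
              (List.replicate ((PySem.List.pyGet? matrix 0).getD []).length false)) := by
  unfold xray_alt
  by_cases hm : matrix = []
  · subst hm
    rw [show PySem.List.pyRange 0 (([] : List (List String)).length : Int) 1 = [] from
      PySem.List.pyRange_one_eq_nil (by simp)]
    simp
  · rw [if_neg (by simpa using hm)]
    simp only [Int.toNat_natCast]
    rw [PySem.List.pyRange_one]
    simp [List.map_map, Function.comp, zero_add]

-- a single row of A equals the corresponding row of B
lemma row_eq (matrix : List (List String)) (path_nodes : List (Int × Int)) (W i : Nat) :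
    ((PySem.List.pyRange 0 (W : Int) 1).foldl (rowStep matrix path_nodes (i:Int))
        (List.replicate W false, 0)).1
      = fillSpans (W : Int) (crossingCols matrix path_nodes (i:Int) (W : Int))
          (List.replicate W false) := by
  rw [rowA_eq matrix path_nodes i W W (le_refl W), crossingCols_eq]
  set cs := (PySem.List.pyRange 0 (W:Int) 1).filter (crossP matrix path_nodes (i:Int)) with hcs
  have hpair : cs.Pairwise (· < ·) :=
    List.Pairwise.filter _ (PySem.List.pairwise_lt_pyRange_one 0 (W:Int))
  have hnn : ∀ x ∈ cs, 0 ≤ x := by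
    intro x hx
    have := List.mem_of_mem_filter hx
    exact ((PySem.List.mem_pyRange_one).mp this).1
  apply List.ext_getElem
  · rw [length_fillSpans _ cs.length cs _ (le_refl _)]
    simp
  · intro j h1 h2
    simp only [List.length_map, List.length_range] at h1
    have hflen : j < (fillSpans (W:Int) cs (List.replicate W false)).length := h2
    rw [← List.getD_eq_getElem _ false hflen,
        fillSpans_getD W cs.length cs _ (le_refl _) hpair hnn (by simp) j h1,
        countCross matrix path_nodes i W j h1]
    simp only [List.getElem_map, List.getElem_range]
    simp [h1]

-- ===== VERDICT (by name: the statement is the Claim_ definition above) =====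
theorem xray_spec : Claim_equal_xray := by
  intro matrix path_nodes _ _
  show xray matrix path_nodes = xray_alt matrix path_nodes
  rw [xray_eq_foldl]
  simp only [Int.toNat_natCast]
  rw [outer_fold matrix path_nodes _ matrix.length (le_refl _)]
  have hdrop : (matrix.map (fun _ => List.replicate ((PySem.List.pyGet? matrix 0).getD []).length false)).drop matrix.length = [] := by
    apply List.drop_eq_nil_of_le; simp
  rw [hdrop, List.append_nil, xray_alt_eq]
  apply List.map_congr_left
  intro i _
  exact row_eq matrix path_nodes _ i
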